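-- pv_equiv track=rewrite | github.com/Secrettestbot/Super-board-game-game | games/sun_tzu.py | _control_bar
-- ===== SOURCE A (Python) =====
-- def _control_bar(ctrl):
--     """Create a visual control bar."""
--     # ctrl ranges -3 to +3
--     bar = ""
--     for i in range(-3, 4):
--         if i == ctrl:
--             bar += "O"
--         elif i == 0:
--             bar += "|"
--         else:
--             bar += "-"
--     return f"[{bar}]"
-- ===== SOURCE B (Python) =====
-- def _control_bar(ctrl):
--     """Create a visual control bar."""
--     chars = list("---|---")
--     if ctrl in range(-3, 4):
--         chars[int(ctrl) + 3] = "O"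
--     return f"[{''.join(chars)}]"
-- ===== Notes on version B (the rewrite author's own statement) =====
-- stated objective: simpler
-- what changed: Replaces the per-position decision loop with a fixed '---|---' template plus a single-cell overwrite when ctrl lies in the bar's range.
import Mathlib
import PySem

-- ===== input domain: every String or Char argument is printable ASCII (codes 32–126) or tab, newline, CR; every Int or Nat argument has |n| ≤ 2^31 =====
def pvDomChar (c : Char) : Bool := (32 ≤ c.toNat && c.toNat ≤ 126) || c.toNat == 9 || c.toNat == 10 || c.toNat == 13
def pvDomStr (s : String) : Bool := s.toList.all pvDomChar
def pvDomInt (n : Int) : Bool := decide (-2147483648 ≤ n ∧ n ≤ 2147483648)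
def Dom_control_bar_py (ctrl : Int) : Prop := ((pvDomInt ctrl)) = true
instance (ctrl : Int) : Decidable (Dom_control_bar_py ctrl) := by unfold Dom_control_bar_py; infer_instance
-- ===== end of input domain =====

-- B replaces A's per-position decision loop by a fixed "---|---" template with one cell overwritten (simpler).


-- ===== PORT A =====
def control_bar_py (ctrl : Int) : String :=
  let bar := (PySem.List.pyRange (-3) 4 1).foldl
    (fun bar i => bar ++ (if i == ctrl then "O" else if i == 0 then "|" else "-")) ""
  "[" ++ bar ++ "]"

-- ===== PORT B =====
def control_bar_py_alt (ctrl : Int) : String :=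
  let chars := "---|---".toList
  let chars := if -3 ≤ ctrl ∧ ctrl < 4 then chars.set (ctrl + 3).toNat 'O' else chars
  "[" ++ String.ofList chars ++ "]"

-- ===== PRECONDITION & SPEC =====
def Spec_control_bar_py (ctrl : Int) (out : String) : Prop := out = control_bar_py_alt ctrl
instance (ctrl : Int) (out : String) : Decidable (Spec_control_bar_py ctrl out) := by unfold Spec_control_bar_py; infer_instance

-- ===== CLAIM (what is proved, stated in full; the proofs are below) =====
def Claim_equal_control_bar_py : Prop := ∀ (ctrl : Int), Dom_control_bar_py ctrl → Spec_control_bar_py ctrl (control_bar_py ctrl)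

-- ===== LEMMAS AND PROOFS =====

theorem control_bar_eq_of_out (ctrl : Int) (h : ¬ (-3 ≤ ctrl ∧ ctrl < 4)) :
    control_bar_py ctrl = control_bar_py_alt ctrl := by
  have h1 : (-3 : Int) ≠ ctrl := by omega
  have h2 : (-2 : Int) ≠ ctrl := by omega
  have h3 : (-1 : Int) ≠ ctrl := by omega
  have h4 : (0 : Int) ≠ ctrl := by omega
  have h5 : (1 : Int) ≠ ctrl := by omega
  have h6 : (2 : Int) ≠ ctrl := by omega
  have h7 : (3 : Int) ≠ ctrl := by omega
  have hr : PySem.List.pyRange (-3) 4 1 = [-3, -2, -1, 0, 1, 2, 3] := by decide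
  simp [control_bar_py, control_bar_py_alt, hr, h, h1, h2, h3, h4, h5, h6, h7]

-- ===== VERDICT (by name: the statement is the Claim_ definition above) =====
theorem control_bar_py_spec : Claim_equal_control_bar_py := by
  intro ctrl _
  unfold Spec_control_bar_py
  by_cases h : -3 ≤ ctrl ∧ ctrl < 4
  · obtain ⟨h1, h2⟩ := h
    interval_cases ctrl <;> decide
  · exact control_bar_eq_of_out ctrl h
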